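-- pv_equiv track=rewrite | github.com/Beskoo/Graphe | algo.py | is_dominant_set
-- ===== SOURCE A (Python) =====
-- def is_dominant_set(graph, set):
--     for node in graph:      # pour chaque noeud
--         if node not in set:
--             flag = False
--             for neighbor in graph[node]:    # pour chaque voisin
--                 if neighbor in set:     # si un voisin est dans le set
--                     flag = True
--                     break
--             if not flag:
--                 return False
--     return True
-- ===== SOURCE B (Python) =====
-- def is_dominant_set(graph, set):
--     # Reverse-index algorithm: build a predecessor index once (n appears in
--     # reverse[s] iff s is in graph[n], so direction is preserved for directed
--     # graphs), propagate coverage from the set members, then compare counts.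
--     reverse = {}
--     for node in graph:
--         for nb in graph[node]:
--             reverse.setdefault(nb, []).append(node)
--     covered = {n for n in graph if n in set}
--     for s in set:
--         covered.update(reverse.get(s, []))
--     return len(covered) == len(graph)
-- ===== Notes on version B (the rewrite author's own statement) =====
-- stated objective: alternative
-- what changed: Replaces A's fused per-node neighbour scan with a different algorithm: build a reverse (predecessor) adjacency index in one pass, propagate coverage from the set members through that index into a covered-set, and decide dominance by comparing |covered| with |graph| instead of testing each node; direction is preserved for directed graphs because the reverse index is built from each node's own adjacency list.
import Mathlib
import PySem

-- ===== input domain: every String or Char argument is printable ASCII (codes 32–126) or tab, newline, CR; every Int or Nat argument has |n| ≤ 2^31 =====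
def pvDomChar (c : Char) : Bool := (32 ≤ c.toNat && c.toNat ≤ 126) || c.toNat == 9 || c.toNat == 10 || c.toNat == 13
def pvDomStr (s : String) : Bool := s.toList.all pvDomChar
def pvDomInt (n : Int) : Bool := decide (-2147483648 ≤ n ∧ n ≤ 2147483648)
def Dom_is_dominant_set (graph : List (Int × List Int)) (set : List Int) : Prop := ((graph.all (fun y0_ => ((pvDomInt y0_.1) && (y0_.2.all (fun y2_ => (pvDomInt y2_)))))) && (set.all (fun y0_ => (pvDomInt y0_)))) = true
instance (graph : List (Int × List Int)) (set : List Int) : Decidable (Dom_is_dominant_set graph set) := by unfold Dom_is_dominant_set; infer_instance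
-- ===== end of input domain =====

-- B replaces A's fused per-node scan by a different algorithm: build a reverse (predecessor)
-- index once, propagate coverage from the set members through it, and compare cardinalities.


-- ===== PORT A =====
-- inner loop: 'for neighbor in graph[node]: if neighbor in set: flag = True; break'
def aNeigh (set : List Int) : List Int → Bool
  | [] => false
  | nb :: rest => if set.contains nb then true else aNeigh set rest

-- outer loop over the dict's keys; under Pre_ (no duplicate keys) each pair's own
-- adjacency list is exactly graph[node]
def aLoop (set : List Int) : List (Int × List Int) → Bool
  | [] => true
  | (node, nbrs) :: rest =>
    if !(set.contains node) then
      let flag := aNeigh set nbrs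
      if !flag then false else aLoop set rest
    else aLoop set rest

def is_dominant_set (graph : List (Int × List Int)) (set : List Int) : Bool :=
  aLoop set graph

-- ===== PORT B =====
-- 'reverse.setdefault(nb, []).append(node)' = reverse[nb] = reverse.get(nb, []) + [node]
def bReverse (graph : List (Int × List Int)) : PySem.Dict Int (List Int) :=
  graph.foldl (fun rev p => p.2.foldl (fun rev nb => rev.modify nb [] (· ++ [p.1])) rev)
    PySem.Dict.empty

def is_dominant_set_alt (graph : List (Int × List Int)) (set : List Int) : Bool :=
  let rev := bReverse graph
  let covered0 : PySem.Set Int :=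
    PySem.Set.ofList ((graph.map Prod.fst).filter (fun n => set.contains n))
  let covered := set.foldl (fun c s => PySem.Set.update c (rev.getD s [])) covered0
  covered.length == graph.length

-- ===== PRECONDITION & SPEC =====
-- Pre_ only rules out duplicate keys in the association-list encoding of the dict: a Python
-- dict cannot contain duplicate keys, so no input A actually accepts is excluded.
def Pre_is_dominant_set (graph : List (Int × List Int)) (set : List Int) : Prop :=
  (graph.map Prod.fst).Nodup
instance (graph : List (Int × List Int)) (set : List Int) : Decidable (Pre_is_dominant_set graph set) := by unfold Pre_is_dominant_set; infer_instance
def pvWitness_is_dominant_set : (List (Int × List Int)) × List Int := ([(1, [2]), (2, [])], [2])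

def Spec_is_dominant_set (graph : List (Int × List Int)) (set : List Int) (out : Bool) : Prop := out = is_dominant_set_alt graph set
instance (graph : List (Int × List Int)) (set : List Int) (out : Bool) : Decidable (Spec_is_dominant_set graph set out) := by unfold Spec_is_dominant_set; infer_instance

-- ===== CLAIM (what is proved, stated in full; the proofs are below) =====
def Claim_equal_is_dominant_set : Prop := ∀ (graph : List (Int × List Int)) (set : List Int), Dom_is_dominant_set graph set → Pre_is_dominant_set graph set → Spec_is_dominant_set graph set (is_dominant_set graph set)

-- ===== LEMMAS AND PROOFS =====
-- the node p.1 is "covered" = the per-pair condition A decides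
def coveredP (set : List Int) (p : Int × List Int) : Bool :=
  set.contains p.1 || p.2.any (fun nb => set.contains nb)

theorem aNeigh_eq_any (set l : List Int) :
    aNeigh set l = l.any (fun nb => set.contains nb) := by
  induction l with
  | nil => rfl
  | cons nb rest ih =>
    simp only [aNeigh, List.any_cons, ih]
    by_cases h : set.contains nb = true <;> simp [h]

theorem aLoop_eq_all (set : List Int) (g : List (Int × List Int)) :
    aLoop set g = g.all (coveredP set) := by
  induction g with
  | nil => rfl
  | cons p rest ih =>
    obtain ⟨node, nbrs⟩ := p
    simp only [aLoop, List.all_cons, aNeigh_eq_any, coveredP, ih]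
    by_cases h : node ∈ set <;> by_cases hn : ∀ x ∈ nbrs, x ∉ set
    · simp [h]
    · simp [h]
    · have h1 : (nbrs.any fun nb => decide (nb ∈ set)) = false :=
        List.any_eq_false.mpr (by intro x hx; simpa using hn x hx)
      simp [h, h1]
    · rw [not_forall] at hn
      simp only [not_forall, not_not, exists_prop] at hn
      obtain ⟨x, hx, hxs⟩ := hn
      have h1 : (nbrs.any fun nb => decide (nb ∈ set)) = true :=
        List.any_eq_true.mpr ⟨x, hx, by simpa using hxs⟩
      simp [h, h1]

-- reverse-index characterisation: m is a predecessor recorded under key c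
-- iff some pair (m, nbrs) of the processed graph has c among its neighbours
theorem bReverse_getD_mem (g : List (Int × List Int)) (d : PySem.Dict Int (List Int))
    (c m : Int) :
    (m ∈ (g.foldl (fun rev p => p.2.foldl (fun rev nb => rev.modify nb [] (· ++ [p.1])) rev) d).getD c []
      ↔ m ∈ d.getD c [] ∨ ∃ p ∈ g, p.1 = m ∧ c ∈ p.2) := by
  induction g generalizing d with
  | nil => simp
  | cons p rest ih =>
    simp only [List.foldl_cons]
    rw [ih]
    have hinner : ((p.2.foldl (fun rev nb => rev.modify nb [] (· ++ [p.1])) d).getD c [])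
        = d.getD c [] ++ ((p.2.map (fun nb => (nb, p.1))).filter (fun q => q.1 == c)).map (·.2) := by
      rw [← PySem.Dict.getD_foldl_modify_append (l := p.2.map (fun nb => (nb, p.1)))]
      rw [List.foldl_map]
    constructor
    · rintro (h | ⟨q, hq, h1, h2⟩)
      · rw [hinner] at h
        rcases List.mem_append.mp h with h | h
        · exact Or.inl h
        · rcases List.mem_map.mp h with ⟨q, hq, hq2⟩
          rcases List.mem_filter.mp hq with ⟨hq1, hqc⟩
          rcases List.mem_map.mp hq1 with ⟨nb, hnb, rfl⟩
          refine Or.inr ⟨p, by simp, by simpa using hq2, ?_⟩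
          simp only [beq_iff_eq] at hqc
          simpa [← hqc] using hnb
      · exact Or.inr ⟨q, by simp [hq], h1, h2⟩
    · rintro (h | ⟨q, hq, h1, h2⟩)
      · left; rw [hinner]; exact List.mem_append.mpr (Or.inl h)
      · rcases List.mem_cons.mp hq with rfl | hq'
        · left; rw [hinner]
          refine List.mem_append.mpr (Or.inr ?_)
          refine List.mem_map.mpr ⟨(c, q.1), List.mem_filter.mpr ⟨?_, by simp⟩, h1⟩
          exact List.mem_map.mpr ⟨c, h2, rfl⟩
        · exact Or.inr ⟨q, hq', h1, h2⟩

theorem mem_update_iff {y : Int} (s : PySem.Set Int) (xs : List Int) :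
    y ∈ PySem.Set.update s xs ↔ y ∈ s ∨ y ∈ xs := by
  rw [PySem.Set.update_eq_append_filter]
  simp [PySem.Set.mem_ofList]
  tauto

theorem mem_coveredFold (set : List Int) (rev : PySem.Dict Int (List Int))
    (c0 : PySem.Set Int) (y : Int) :
    (y ∈ set.foldl (fun c s => PySem.Set.update c (rev.getD s [])) c0
      ↔ y ∈ c0 ∨ ∃ s ∈ set, y ∈ rev.getD s []) := by
  induction set generalizing c0 with
  | nil => simp
  | cons s rest ih =>
    simp only [List.foldl_cons]
    rw [ih, mem_update_iff]
    constructor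
    · rintro ((h | h) | ⟨t, ht, hy⟩)
      · exact Or.inl h
      · exact Or.inr ⟨s, by simp, h⟩
      · exact Or.inr ⟨t, by simp [ht], hy⟩
    · rintro (h | ⟨t, ht, hy⟩)
      · exact Or.inl (Or.inl h)
      · rcases List.mem_cons.mp ht with rfl | ht'
        · exact Or.inl (Or.inr hy)
        · exact Or.inr ⟨t, ht', hy⟩

theorem nodup_coveredFold (set : List Int) (rev : PySem.Dict Int (List Int))
    (c0 : PySem.Set Int) (h : c0.Nodup) :
    (set.foldl (fun c s => PySem.Set.update c (rev.getD s [])) c0).Nodup := by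
  induction set generalizing c0 with
  | nil => exact h
  | cons s rest ih => exact ih _ (PySem.Set.nodup_update _ _ h)

theorem inj_keys {g : List (Int × List Int)} (hnd : (g.map Prod.fst).Nodup)
    {p q : Int × List Int} (hp : p ∈ g) (hq : q ∈ g) (h : q.1 = p.1) : q = p :=
  List.inj_on_of_nodup_map hnd hq hp h

-- ===== VERDICT (by name: the statement is the Claim_ definition above) =====
theorem is_dominant_set_spec : Claim_equal_is_dominant_set := by
  intro graph set _ hpre
  unfold Spec_is_dominant_set is_dominant_set is_dominant_set_alt
  rw [aLoop_eq_all]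
  set K := graph.map Prod.fst with hK
  set rev := bReverse graph with hrev
  set c0 : PySem.Set Int := PySem.Set.ofList (K.filter (fun n => set.contains n)) with hc0
  set C := set.foldl (fun c s => PySem.Set.update c (rev.getD s [])) c0 with hC
  have hmemC : ∀ y, y ∈ C ↔ y ∈ c0 ∨ ∃ s ∈ set, y ∈ rev.getD s [] := fun y =>
    mem_coveredFold set rev c0 y
  have hmemRev : ∀ s m, m ∈ rev.getD s [] ↔ ∃ p ∈ graph, p.1 = m ∧ s ∈ p.2 := by
    intro s m
    rw [hrev]; unfold bReverse
    rw [bReverse_getD_mem]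
    simp
  have hCnodup : C.Nodup := nodup_coveredFold set rev c0 (PySem.Set.nodup_ofList _)
  have hCsub : C ⊆ K := by
    intro y hy
    rcases (hmemC y).mp hy with h | ⟨s, _, hs⟩
    · exact List.mem_of_mem_filter ((PySem.Set.mem_ofList _ _).mp h)
    · rcases (hmemRev s y).mp hs with ⟨p, hp, rfl, _⟩
      exact List.mem_map.mpr ⟨p, hp, rfl⟩
  -- per-key coverage: a key k of the graph is in C iff its pair satisfies coveredP
  have hkey : ∀ p ∈ graph, (p.1 ∈ C ↔ coveredP set p = true) := by
    intro p hp
    rw [hmemC]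
    constructor
    · rintro (h | ⟨s, hs, hrevm⟩)
      · have h2 := (List.mem_filter.mp ((PySem.Set.mem_ofList _ _).mp h)).2
        simp only [coveredP, Bool.or_eq_true]
        exact Or.inl h2
      · rcases (hmemRev s p.1).mp hrevm with ⟨q, hq, hq1, hq2⟩
        have : q = p := inj_keys hpre hp hq hq1
        subst this
        simp only [coveredP, Bool.or_eq_true]
        exact Or.inr (List.any_eq_true.mpr ⟨s, hq2, by simpa using hs⟩)
    · intro h
      by_cases hin : set.contains p.1 = true
      · refine Or.inl ((PySem.Set.mem_ofList _ _).mpr (List.mem_filter.mpr ⟨?_, hin⟩))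
        exact List.mem_map.mpr ⟨p, hp, rfl⟩
      · have hin' : p.1 ∉ set := by simpa using hin
        have hany : p.2.any (fun nb => set.contains nb) = true := by
          simpa [coveredP, hin'] using h
        rcases List.any_eq_true.mp hany with ⟨s, hs, hmem⟩
        refine Or.inr ⟨s, by simpa using hmem, (hmemRev s p.1).mpr ⟨p, hp, rfl, hs⟩⟩
  have hKlen : K.length = graph.length := by simp [hK]
  -- cardinality argument
  have hlen : (C.length == graph.length) = graph.all (coveredP set) := by
    cases hall : graph.all (coveredP set) with
    | true =>
      have hKsub : K ⊆ C := by
        intro k hk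
        rcases List.mem_map.mp hk with ⟨p, hp, rfl⟩
        exact (hkey p hp).mpr (List.all_eq_true.mp hall p hp)
      have hperm : C.Perm K :=
        (List.perm_ext_iff_of_nodup hCnodup hpre).mpr
          (fun a => ⟨fun h => hCsub h, fun h => hKsub h⟩)
      simp [hperm.length_eq, hKlen]
    | false =>
      rcases List.all_eq_false.mp hall with ⟨p, hp, hnp⟩
      have hkp : p.1 ∉ C := fun h => hnp ((hkey p hp).mp h)
      have hsub : List.Subperm C K := hCnodup.subperm hCsub
      have hlt : C.length < K.length := by
        rcases lt_or_eq_of_le hsub.length_le with h | h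
        · exact h
        · exfalso
          have hperm : C.Perm K := hsub.perm_of_length_le (le_of_eq h.symm)
          exact hkp (hperm.mem_iff.mpr (List.mem_map.mpr ⟨p, hp, rfl⟩))
      have hne : C.length ≠ graph.length := by rw [← hKlen]; exact Nat.ne_of_lt hlt
      simp [hne]
  simpa using hlen.symm
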